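-- pv_equiv track=rewrite | github.com/yangchen706/hs-and-hd | unit.py | get_num_node_in_communities
-- ===== SOURCE A (Python) =====
-- def get_num_node_in_communities(communities,nodes):
--     '''
--     以字典的形式获取所有节点在各个社区中出现的次数，可以用来排定那些节点是在重叠区域的
--     input:communities 社区划分 list形式
--     nodes：图中的所有节点
--     返回：
--         字典：所有节点在各个社区中出现的次数(不包含没有在社区结构中出现的节点)
--     '''
--     num_node_in_communities = {}
--     k = 0
--     for i in nodes:
--         for j in communities:
--             if i in j:
--                 k += 1
--
--         if k > 0:
--             num_node_in_communities[i] = k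
--         k = 0
--     return num_node_in_communities
-- ===== SOURCE B (Python) =====
-- def get_num_node_in_communities(communities, nodes):
--     # Hash-count: one pass over the communities builds a membership counter
--     # (each community deduplicated via set), then one pass over nodes emits it.
--     cnt = {}
--     for com in communities:
--         for x in set(com):
--             cnt[x] = cnt.get(x, 0) + 1
--     res = {}
--     for i in nodes:
--         c = cnt.get(i, 0)
--         if c > 0:
--             res[i] = c
--     return res
-- ===== Notes on version B (the rewrite author's own statement) =====
-- stated objective: faster
-- what changed: Replaces the per-node scan over all communities with a single counting pass that builds a membership counter from each community's distinct elements, then emits counts in nodes order.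
import Mathlib
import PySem

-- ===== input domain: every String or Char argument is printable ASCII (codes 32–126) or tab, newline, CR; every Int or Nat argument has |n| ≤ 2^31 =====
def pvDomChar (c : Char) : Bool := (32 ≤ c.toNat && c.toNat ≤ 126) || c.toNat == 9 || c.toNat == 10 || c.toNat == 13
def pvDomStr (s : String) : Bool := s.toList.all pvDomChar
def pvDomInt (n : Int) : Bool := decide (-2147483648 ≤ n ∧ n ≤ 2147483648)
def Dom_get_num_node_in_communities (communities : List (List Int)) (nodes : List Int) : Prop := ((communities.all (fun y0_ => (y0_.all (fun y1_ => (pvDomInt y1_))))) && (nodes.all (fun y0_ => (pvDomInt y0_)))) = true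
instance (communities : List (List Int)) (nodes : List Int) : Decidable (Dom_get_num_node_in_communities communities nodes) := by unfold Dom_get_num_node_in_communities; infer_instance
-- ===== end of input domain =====

-- B replaces A's per-node scan over all communities by one counting pass over the
-- communities' distinct elements followed by one pass over nodes (objective: faster).

-- ===== PORT A =====
-- for i in nodes: k = number of communities j with i in j; if k > 0: dict[i] = k
def get_num_node_in_communities (communities : List (List Int)) (nodes : List Int) : List (Int × Int) :=
  (nodes.foldl (fun d i =>
      let k := communities.foldl (fun k j => if i ∈ j then k + 1 else k) (0 : Int)
      if k > 0 then d.insert i k else d)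
    (PySem.Dict.empty : PySem.Dict Int Int)).items

-- ===== PORT B =====
-- cnt[x] += 1 for each x in set(com), for each com; then emit cnt.get(i, 0) in nodes order when > 0
def get_num_node_in_communities_alt (communities : List (List Int)) (nodes : List Int) : List (Int × Int) :=
  let cnt := communities.foldl (fun d com =>
      (PySem.Set.ofList com).foldl (fun d x => d.modify x 0 (· + 1)) d)
    (PySem.Dict.empty : PySem.Dict Int Int)
  (nodes.foldl (fun r i =>
      let c := cnt.getD i 0
      if c > 0 then r.insert i c else r)
    (PySem.Dict.empty : PySem.Dict Int Int)).items

-- ===== PRECONDITION & SPEC =====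
def Spec_get_num_node_in_communities (communities : List (List Int)) (nodes : List Int) (out : List (Int × Int)) : Prop := out = get_num_node_in_communities_alt communities nodes
instance (communities : List (List Int)) (nodes : List Int) (out : List (Int × Int)) : Decidable (Spec_get_num_node_in_communities communities nodes out) := by unfold Spec_get_num_node_in_communities; infer_instance

-- ===== CLAIM (what is proved, stated in full; the proofs are below) =====
def Claim_equal_get_num_node_in_communities : Prop := ∀ (communities : List (List Int)) (nodes : List Int), Dom_get_num_node_in_communities communities nodes → Spec_get_num_node_in_communities communities nodes (get_num_node_in_communities communities nodes)

-- ===== LEMMAS AND PROOFS =====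

-- B's counter looks up to the number of communities containing i.
theorem cnt_getD (communities : List (List Int)) (d : PySem.Dict Int Int) (i : Int) :
    (communities.foldl (fun d com =>
        (PySem.Set.ofList com).foldl (fun d x => d.modify x 0 (· + 1)) d) d).getD i 0
      = d.getD i 0 + (communities.countP (fun j => decide (i ∈ j)) : Int) := by
  induction communities generalizing d with
  | nil => simp
  | cons com rest ih =>
    rw [List.foldl_cons, ih, PySem.Dict.getD_foldl_modify_add_one]
    by_cases h : i ∈ com
    · simp [h]
      ring
    · have hc : (PySem.Set.ofList com).count i = 0 :=
        List.count_eq_zero.2 (fun hm => h (by simpa using hm))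
      simp [hc, h]

-- A's inner loop computes the same count.
theorem inner_count (communities : List (List Int)) (i : Int) :
    communities.foldl (fun k j => if i ∈ j then k + 1 else k) (0 : Int)
      = (communities.countP (fun j => decide (i ∈ j)) : Int) := by
  have := PySem.List.foldl_ite_add_one (fun j : List Int => i ∈ j) communities (0 : Int)
  simpa using this

-- ===== VERDICT (by name: the statement is the Claim_ definition above) =====
theorem get_num_node_in_communities_spec : Claim_equal_get_num_node_in_communities := by
  intro communities nodes _
  unfold Spec_get_num_node_in_communities get_num_node_in_communities get_num_node_in_communities_alt
  congr 1
  apply PySem.List.foldl_congr_mem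
  intro d i _
  simp only [inner_count, cnt_getD, PySem.Dict.getD_empty, zero_add]
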